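-- pv_equiv track=rewrite | github.com/pypi-data/pypi-mirror-192 | packages/admcycles/admcycles-1.4.tar.gz/admcycles-1.4/admcycles/DR/relations.py | choose_orders_sparse
-- ===== SOURCE A (Python) =====
-- def choose_orders_sparse(D, nrows, ncols):
--     row_nums = [0 for i in range(nrows)]
--     col_nums = [0 for j in range(ncols)]
--     for key in D:
--         row_nums[key[0]] += 1
--         col_nums[key[1]] += 1
--     row_order = list(range(nrows))
--     col_order = list(range(ncols))
--     row_order.sort(key=lambda x: row_nums[x])
--     col_order.sort(key=lambda x: col_nums[x])
--     return row_order, col_order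
-- ===== SOURCE B (Python) =====
-- def choose_orders_sparse(D, nrows, ncols):
--     row_nums = [0] * nrows
--     col_nums = [0] * ncols
--     for key in D:
--         row_nums[key[0]] += 1
--         col_nums[key[1]] += 1
--     m = len(D) + 1
--     row_order = [i for c in range(m) for i in range(nrows) if row_nums[i] == c]
--     col_order = [j for c in range(m) for j in range(ncols) if col_nums[j] == c]
--     return row_order, col_order
-- ===== Notes on version B (the rewrite author's own statement) =====
-- stated objective: alternative
-- what changed: B keeps the same count arrays but replaces Python's comparison sort with a distribution (counting) sort: for each count value c = 0..len(D) in increasing order it emits the indices whose count equals c, which reproduces the stable sort's tie-breaking exactly.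
import Mathlib
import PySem

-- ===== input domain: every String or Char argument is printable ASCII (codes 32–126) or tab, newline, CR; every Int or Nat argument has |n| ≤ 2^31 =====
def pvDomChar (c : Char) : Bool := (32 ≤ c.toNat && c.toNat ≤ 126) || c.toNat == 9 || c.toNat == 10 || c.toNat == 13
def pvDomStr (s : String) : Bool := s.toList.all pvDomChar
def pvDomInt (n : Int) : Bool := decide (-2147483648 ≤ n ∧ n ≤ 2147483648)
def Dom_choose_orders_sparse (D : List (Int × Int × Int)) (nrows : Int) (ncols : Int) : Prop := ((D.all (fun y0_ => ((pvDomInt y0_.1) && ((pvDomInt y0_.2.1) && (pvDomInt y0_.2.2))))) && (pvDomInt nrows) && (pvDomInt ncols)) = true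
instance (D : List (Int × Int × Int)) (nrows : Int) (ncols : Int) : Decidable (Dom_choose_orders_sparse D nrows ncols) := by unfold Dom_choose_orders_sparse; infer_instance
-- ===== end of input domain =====

-- B replaces the comparison sort by a stable distribution (counting) sort over the count values; same return value.

-- ===== PORT A =====
-- the shared counting loop 'for key in D: row_nums[key[0]] += 1; col_nums[key[1]] += 1'
def pvCountStep (p : List Int × List Int) (key : Int × Int × Int) : List Int × List Int :=
  (PySem.List.pySetD p.1 key.1 (PySem.List.pyGetD p.1 key.1 0 + 1),
   PySem.List.pySetD p.2 key.2.1 (PySem.List.pyGetD p.2 key.2.1 0 + 1))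

def choose_orders_sparse (D : List (Int × Int × Int)) (nrows : Int) (ncols : Int) : List Int × List Int :=
  let row_nums : List Int := (PySem.List.pyRange 0 nrows 1).map (fun _ => 0)
  let col_nums : List Int := (PySem.List.pyRange 0 ncols 1).map (fun _ => 0)
  let p := D.foldl pvCountStep (row_nums, col_nums)
  let row_order := PySem.List.sorted (PySem.List.pyRange 0 nrows 1) (fun x => PySem.List.pyGetD p.1 x 0) false
  let col_order := PySem.List.sorted (PySem.List.pyRange 0 ncols 1) (fun x => PySem.List.pyGetD p.2 x 0) false
  (row_order, col_order)

-- ===== PORT B =====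
-- '[i for c in range(m) for i in range(n) if nums[i] == c]'
def pvBucketOrder (nums : List Int) (n : Int) (m : Int) : List Int :=
  (PySem.List.pyRange 0 m 1).flatMap (fun c =>
    (PySem.List.pyRange 0 n 1).filter (fun i => decide (PySem.List.pyGetD nums i 0 = c)))

def choose_orders_sparse_alt (D : List (Int × Int × Int)) (nrows : Int) (ncols : Int) : List Int × List Int :=
  let row_nums : List Int := List.replicate nrows.toNat 0
  let col_nums : List Int := List.replicate ncols.toNat 0
  let p := D.foldl pvCountStep (row_nums, col_nums)
  let m : Int := (D.length : Int) + 1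
  (pvBucketOrder p.1 nrows m, pvBucketOrder p.2 ncols m)

-- ===== PRECONDITION & SPEC =====
-- Pre_ excludes exactly the inputs where Python raises IndexError: a key whose row (resp. column)
-- index is outside [-nrows, nrows) (resp. [-ncols, ncols)); both A and B raise there.
def Pre_choose_orders_sparse (D : List (Int × Int × Int)) (nrows : Int) (ncols : Int) : Prop :=
  ∀ k ∈ D, -nrows ≤ k.1 ∧ k.1 < nrows ∧ -ncols ≤ k.2.1 ∧ k.2.1 < ncols
instance (D : List (Int × Int × Int)) (nrows : Int) (ncols : Int) : Decidable (Pre_choose_orders_sparse D nrows ncols) := by unfold Pre_choose_orders_sparse; infer_instance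
def pvWitness_choose_orders_sparse : (List (Int × Int × Int)) × Int × Int := ([(0, 1, 5), (2, 0, -1), (2, 1, 3)], 3, 2)

def Spec_choose_orders_sparse (D : List (Int × Int × Int)) (nrows : Int) (ncols : Int) (out : List Int × List Int) : Prop := out = choose_orders_sparse_alt D nrows ncols
instance (D : List (Int × Int × Int)) (nrows : Int) (ncols : Int) (out : List Int × List Int) : Decidable (Spec_choose_orders_sparse D nrows ncols out) := by unfold Spec_choose_orders_sparse; infer_instance

-- ===== CLAIM (what is proved, stated in full; the proofs are below) =====
def Claim_equal_choose_orders_sparse : Prop := ∀ (D : List (Int × Int × Int)) (nrows : Int) (ncols : Int), Dom_choose_orders_sparse D nrows ncols → Pre_choose_orders_sparse D nrows ncols → Spec_choose_orders_sparse D nrows ncols (choose_orders_sparse D nrows ncols)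

-- ===== LEMMAS AND PROOFS =====

-- membership through insertBy
theorem pv_mem_insertBy {α : Type} (bef : α → α → Bool) (x a : α) (l : List α) :
    a ∈ PySem.List.insertBy bef x l ↔ a = x ∨ a ∈ l := by
  induction l with
  | nil => simp [PySem.List.insertBy]
  | cons y ys ih =>
    by_cases h : bef x y = true
    · simp [PySem.List.insertBy, h]
    · simp [PySem.List.insertBy, h, ih]; tauto

-- insertBy preserves sortedness (by key f)
theorem pv_pairwise_insertBy (f : Int → Int) (x : Int) (l : List Int)
    (hl : l.Pairwise (fun a b => f a ≤ f b)) :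
    (PySem.List.insertBy (fun a b => decide (f a < f b)) x l).Pairwise (fun a b => f a ≤ f b) := by
  induction l with
  | nil => simp [PySem.List.insertBy]
  | cons y ys ih =>
    rcases List.pairwise_cons.mp hl with ⟨hy, hys⟩
    by_cases h : decide (f x < f y) = true
    · simp only [PySem.List.insertBy, h, if_pos]
      refine List.pairwise_cons.mpr ⟨?_, hl⟩
      intro b hb
      rcases List.mem_cons.mp hb with rfl | hb
      · exact le_of_lt (of_decide_eq_true h)
      · exact le_trans (le_of_lt (of_decide_eq_true h)) (hy b hb)
    · simp only [PySem.List.insertBy, h, if_neg, Bool.false_eq_true, not_false_iff]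
      refine List.pairwise_cons.mpr ⟨?_, ih hys⟩
      intro b hb
      rcases (pv_mem_insertBy _ x b ys).mp hb with rfl | hb
      · exact le_of_not_gt (fun hlt => h (decide_eq_true hlt))
      · exact hy b hb

-- stability of one insertion, seen through each key class c
theorem pv_filter_insertBy (f : Int → Int) (c : Int) (x : Int) (l : List Int)
    (hl : l.Pairwise (fun a b => f a ≤ f b)) :
    (PySem.List.insertBy (fun a b => decide (f a < f b)) x l).filter (fun a => decide (f a = c)) =
      if f x = c then l.filter (fun a => decide (f a = c)) ++ [x]
      else l.filter (fun a => decide (f a = c)) := by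
  induction l with
  | nil =>
    simp only [PySem.List.insertBy]
    by_cases hx : f x = c <;> simp [hx]
  | cons y ys ih =>
    rcases List.pairwise_cons.mp hl with ⟨hy, hys⟩
    by_cases h : decide (f x < f y) = true
    · have hlt : f x < f y := of_decide_eq_true h
      simp only [PySem.List.insertBy, h, if_pos]
      by_cases hx : f x = c
      · have hno : ∀ a ∈ y :: ys, ¬ (f a = c) := by
          intro a ha
          rcases List.mem_cons.mp ha with rfl | ha
          · omega
          · have := hy a ha; omega
        have h1 : (y :: ys).filter (fun a => decide (f a = c)) = [] := by
          apply List.filter_eq_nil_iff.mpr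
          intro a ha
          simpa using hno a ha
        simp [List.filter_cons, hx, h1, List.filter_eq_nil_iff.mp h1 y (by simp),
              List.filter_eq_nil_iff.mp h1]
      · simp [List.filter_cons, hx]
    · simp only [PySem.List.insertBy, h, if_neg, Bool.false_eq_true, not_false_iff]
      by_cases hyc : f y = c <;> by_cases hx : f x = c <;>
        simp [List.filter_cons, hyc, hx, ih hys]

-- the sorted fold: sortedness plus per-class stability of the accumulator
theorem pv_foldl_insert (f : Int → Int) (xs : List Int) :
    ∀ acc : List Int, acc.Pairwise (fun a b => f a ≤ f b) →
      (xs.foldl (fun acc x => PySem.List.insertBy (fun a b => decide (f a < f b)) x acc) acc).Pairwise (fun a b => f a ≤ f b) ∧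
      ∀ c : Int, (xs.foldl (fun acc x => PySem.List.insertBy (fun a b => decide (f a < f b)) x acc) acc).filter (fun a => decide (f a = c)) =
        acc.filter (fun a => decide (f a = c)) ++ xs.filter (fun a => decide (f a = c)) := by
  induction xs with
  | nil => intro acc hacc; simp [hacc]
  | cons x xs ih =>
    intro acc hacc
    obtain ⟨h1, h2⟩ := ih (PySem.List.insertBy (fun a b => decide (f a < f b)) x acc)
      (pv_pairwise_insertBy f x acc hacc)
    refine ⟨h1, fun c => ?_⟩
    rw [List.foldl_cons, h2 c, pv_filter_insertBy f c x acc hacc, List.filter_cons]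
    by_cases hx : f x = c <;> simp [hx]

theorem pv_sorted_eq_foldl (f : Int → Int) (xs : List Int) :
    PySem.List.sorted xs f false =
      xs.foldl (fun acc x => PySem.List.insertBy (fun a b => decide (f a < f b)) x acc) [] := rfl

-- stability of the whole sort: each key class keeps its original order
theorem pv_sorted_filter (f : Int → Int) (xs : List Int) (c : Int) :
    (PySem.List.sorted xs f false).filter (fun a => decide (f a = c)) =
      xs.filter (fun a => decide (f a = c)) := by
  rw [pv_sorted_eq_foldl]
  simpa using (pv_foldl_insert f xs [] (by simp)).2 c

-- a sorted list whose keys are ≥ lo splits as (class lo) ++ (keys > lo)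
theorem pv_sorted_split (f : Int → Int) (lo : Int) (S : List Int)
    (hS : S.Pairwise (fun a b => f a ≤ f b)) (hlo : ∀ x ∈ S, lo ≤ f x) :
    S = S.filter (fun a => decide (f a = lo)) ++ S.filter (fun a => !decide (f a = lo)) := by
  induction S with
  | nil => simp
  | cons a t ih =>
    rcases List.pairwise_cons.mp hS with ⟨ha, ht⟩
    by_cases hac : f a = lo
    · simp only [List.filter_cons, hac, decide_true, decide_not]
      simpa using ih ht (fun x hx => hlo x (by simp [hx]))
    · have hgt : ∀ x ∈ t, ¬ f x = lo := by
        intro x hx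
        have h1 := ha x hx
        have h2 := hlo a (by simp)
        omega
      have h0 : t.filter (fun a => decide (f a = lo)) = [] :=
        List.filter_eq_nil_iff.mpr (by intro x hx; simpa using hgt x hx)
      have h1 : t.filter (fun a => !decide (f a = lo)) = t :=
        List.filter_eq_self.mpr (by intro x hx; simp [hgt x hx])
      simp [List.filter_cons, hac, h0, h1]

-- flatMap respects pointwise-equal functions
theorem pv_flatMap_congr {α β : Type} (l : List α) (f g : α → List β)
    (h : ∀ a ∈ l, f a = g a) : l.flatMap f = l.flatMap g := by
  induction l with
  | nil => simp
  | cons a t ih =>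
    simp only [List.flatMap_cons, h a (by simp), ih (fun a ha => h a (by simp [ha]))]

-- decomposition of a sorted list into its key classes, enumerated in increasing order
theorem pv_decomp (f : Int → Int) (hi : Int) :
    ∀ (k : Nat) (lo : Int) (S : List Int), (hi - lo).toNat = k →
      S.Pairwise (fun a b => f a ≤ f b) → (∀ x ∈ S, lo ≤ f x ∧ f x < hi) →
      (PySem.List.pyRange lo hi 1).flatMap (fun c => S.filter (fun a => decide (f a = c))) = S := by
  intro k
  induction k with
  | zero =>
    intro lo S hk hS hb
    have hle : hi ≤ lo := by omega
    have hSnil : S = [] := by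
      cases S with
      | nil => rfl
      | cons a t => exact absurd (hb a (by simp)) (by omega)
    simp [hSnil, PySem.List.pyRange_one_eq_nil hle]
  | succ k ih =>
    intro lo S hk hS hb
    have hlt : lo < hi := by omega
    rw [PySem.List.pyRange_one_cons hlt, List.flatMap_cons]
    have hsplit := pv_sorted_split f lo S hS (fun x hx => (hb x hx).1)
    set S' := S.filter (fun a => !decide (f a = lo)) with hS'
    have hmemS' : ∀ x ∈ S', x ∈ S ∧ ¬ f x = lo := by
      intro x hx
      rw [hS', List.mem_filter] at hx
      exact ⟨hx.1, by simpa using hx.2⟩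
    have hrest : (PySem.List.pyRange (lo+1) hi 1).flatMap (fun c => S.filter (fun a => decide (f a = c))) =
        (PySem.List.pyRange (lo+1) hi 1).flatMap (fun c => S'.filter (fun a => decide (f a = c))) := by
      apply pv_flatMap_congr
      intro c hc
      have hcl : lo + 1 ≤ c := (PySem.List.mem_pyRange_one.mp hc).1
      rw [hS', List.filter_filter]
      apply List.filter_congr
      intro x hx
      by_cases hxc : f x = c
      · simp only [hxc, decide_true, Bool.true_and, decide_eq_true_eq]; simp; omega
      · simp [hxc]
    have hih : (PySem.List.pyRange (lo+1) hi 1).flatMap (fun c => S'.filter (fun a => decide (f a = c))) = S' := by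
      apply ih (lo+1) S' (by omega)
      · exact hS.sublist List.filter_sublist
      · intro x hx
        obtain ⟨hxS, hxlo⟩ := hmemS' x hx
        have := hb x hxS
        omega
    rw [hrest, hih]
    exact hsplit.symm

-- counting-sort form equals Python's stable sort, given key bounds
theorem pv_bucket_eq_sorted (f : Int → Int) (m : Int) (xs : List Int)
    (hb : ∀ x ∈ xs, 0 ≤ f x ∧ f x < m) :
    (PySem.List.pyRange 0 m 1).flatMap (fun c => xs.filter (fun a => decide (f a = c))) =
      PySem.List.sorted xs f false := by
  have h1 : (PySem.List.pyRange 0 m 1).flatMap (fun c => xs.filter (fun a => decide (f a = c))) =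
      (PySem.List.pyRange 0 m 1).flatMap
        (fun c => (PySem.List.sorted xs f false).filter (fun a => decide (f a = c))) :=
    pv_flatMap_congr _ _ _ (fun c _ => (pv_sorted_filter f xs c).symm)
  rw [h1]
  apply pv_decomp f m ((m - 0).toNat) 0 _ rfl (PySem.List.sorted_pairwise xs f)
  intro x hx
  exact hb x ((PySem.List.mem_sorted _ _ _ _).mp hx)

-- a pyGetD value is an element of the list or the default
theorem pv_pyGetD_or (l : List Int) (i : Int) (d : Int) :
    PySem.List.pyGetD l i d ∈ l ∨ PySem.List.pyGetD l i d = d := by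
  unfold PySem.List.pyGetD
  cases h : PySem.List.pyGet? l i with
  | none => right; rfl
  | some x => left; exact PySem.List.mem_of_pyGet?_eq_some l h

-- elements after pySetD are old elements or the written value
theorem pv_mem_pySetD (l : List Int) (i : Int) (v a : Int)
    (ha : a ∈ PySem.List.pySetD l i v) : a ∈ l ∨ a = v := by
  unfold PySem.List.pySetD PySem.List.pySet? at ha
  cases h : PySem.List.pyIdx? l.length i with
  | none => rw [h] at ha; simp at ha; left; exact ha
  | some k =>
    rw [h] at ha; simp at ha
    exact List.mem_or_eq_of_mem_set ha

-- the counting loop keeps every entry between 0 and (number of processed keys)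
theorem pv_counts_bound (D : List (Int × Int × Int)) :
    ∀ (p : List Int × List Int) (t : Int), 0 ≤ t →
      (∀ v ∈ p.1, 0 ≤ v ∧ v ≤ t) → (∀ v ∈ p.2, 0 ≤ v ∧ v ≤ t) →
      (∀ v ∈ (D.foldl pvCountStep p).1, 0 ≤ v ∧ v ≤ t + D.length) ∧
      (∀ v ∈ (D.foldl pvCountStep p).2, 0 ≤ v ∧ v ≤ t + D.length) := by
  induction D with
  | nil => intro p t ht h1 h2; simpa using ⟨h1, h2⟩
  | cons key Dt ih =>
    intro p t ht h1 h2
    have step1 : ∀ v ∈ (pvCountStep p key).1, 0 ≤ v ∧ v ≤ t + 1 := by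
      intro v hv
      rcases pv_mem_pySetD _ _ _ _ hv with hvo | hvn
      · have := h1 v hvo; omega
      · rcases pv_pyGetD_or p.1 key.1 0 with hm | h0
        · have := h1 _ hm; omega
        · rw [hvn, h0]; omega
    have step2 : ∀ v ∈ (pvCountStep p key).2, 0 ≤ v ∧ v ≤ t + 1 := by
      intro v hv
      rcases pv_mem_pySetD _ _ _ _ hv with hvo | hvn
      · have := h2 v hvo; omega
      · rcases pv_pyGetD_or p.2 key.2.1 0 with hm | h0
        · have := h2 _ hm; omega
        · rw [hvn, h0]; omega
    obtain ⟨g1, g2⟩ := ih (pvCountStep p key) (t + 1) (by omega) step1 step2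
    constructor
    · intro v hv; have := g1 v hv; simp only [List.length_cons] at *; push_cast at *; omega
    · intro v hv; have := g2 v hv; simp only [List.length_cons] at *; push_cast at *; omega

-- the two initial count arrays are the same list
theorem pv_init_eq (n : Int) :
    (PySem.List.pyRange 0 n 1).map (fun _ => (0 : Int)) = List.replicate n.toNat 0 := by
  rw [List.map_const']
  congr 1
  rw [PySem.List.length_pyRange_one]
  omega

-- ===== VERDICT (by name: the statement is the Claim_ definition above) =====
theorem choose_orders_sparse_spec : Claim_equal_choose_orders_sparse := by
  intro D nrows ncols _ _
  simp only [Spec_choose_orders_sparse, choose_orders_sparse, choose_orders_sparse_alt,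
    ← pv_init_eq]
  set p := D.foldl pvCountStep
    ((PySem.List.pyRange 0 nrows 1).map (fun _ => (0 : Int)),
     (PySem.List.pyRange 0 ncols 1).map (fun _ => (0 : Int))) with hp
  have hz1 : ∀ v ∈ ((PySem.List.pyRange 0 nrows 1).map (fun _ => (0 : Int))), 0 ≤ v ∧ v ≤ 0 := by
    intro v hv; rcases List.mem_map.mp hv with ⟨_, _, rfl⟩; omega
  have hz2 : ∀ v ∈ ((PySem.List.pyRange 0 ncols 1).map (fun _ => (0 : Int))), 0 ≤ v ∧ v ≤ 0 := by
    intro v hv; rcases List.mem_map.mp hv with ⟨_, _, rfl⟩; omega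
  obtain ⟨hb1, hb2⟩ := pv_counts_bound D
    ((PySem.List.pyRange 0 nrows 1).map (fun _ => (0 : Int)),
     (PySem.List.pyRange 0 ncols 1).map (fun _ => (0 : Int))) 0 (by omega) hz1 hz2
  rw [← hp] at hb1 hb2
  have e1 : pvBucketOrder p.1 nrows ((D.length : Int) + 1) =
      PySem.List.sorted (PySem.List.pyRange 0 nrows 1) (fun x => PySem.List.pyGetD p.1 x 0) false := by
    apply pv_bucket_eq_sorted
    intro x _
    rcases pv_pyGetD_or p.1 x 0 with hm | h0
    · have := hb1 _ hm; omega
    · rw [h0]; omega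
  have e2 : pvBucketOrder p.2 ncols ((D.length : Int) + 1) =
      PySem.List.sorted (PySem.List.pyRange 0 ncols 1) (fun x => PySem.List.pyGetD p.2 x 0) false := by
    apply pv_bucket_eq_sorted
    intro x _
    rcases pv_pyGetD_or p.2 x 0 with hm | h0
    · have := hb2 _ hm; omega
    · rw [h0]; omega
  rw [← e1, ← e2]
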